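-- pv_equiv track=rewrite | github.com/ctoth/propstore | propstore/cli/concept.py | _rename_cel_identifier
-- ===== SOURCE A (Python) =====
-- def _rename_cel_identifier(expression: str, old_name: str, new_name: str) -> str:
--     """Rename a CEL identifier without touching quoted string literals."""
--     result: list[str] = []
--     quote: str | None = None
--     i = 0
--     while i < len(expression):
--         ch = expression[i]
--         if quote is not None:
--             result.append(ch)
--             if ch == quote and (i == 0 or expression[i - 1] != "\\"):
--                 quote = None
--             i += 1
--             continue
--
--         if ch in ("'", '"'):
--             quote = ch
--             result.append(ch)
--             i += 1
--             continue
--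
--         if ch.isalpha() or ch == "_":
--             j = i + 1
--             while j < len(expression) and (expression[j].isalnum() or expression[j] == "_"):
--                 j += 1
--             token = expression[i:j]
--             result.append(new_name if token == old_name else token)
--             i = j
--             continue
--
--         result.append(ch)
--         i += 1
--
--     return "".join(result)
-- ===== SOURCE B (Python) =====
-- def _tokenize(expression):
--     """Split into tokens: (True, identifier) or (False, literal text / single char)."""
--     n = len(expression)
--     tokens = []
--     i = 0
--     while i < n:
--         ch = expression[i]
--         if ch == "'" or ch == '"':
--             # a whole quoted literal is one token (naive one-char-back escape rule)
--             j = i + 1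
--             while j < n and not (expression[j] == ch and expression[j - 1] != "\\"):
--                 j += 1
--             j = j + 1 if j < n else n  # include the closing quote when present
--             tokens.append((False, expression[i:j]))
--             i = j
--         elif ch.isalpha() or ch == "_":
--             j = i + 1
--             while j < n and (expression[j].isalnum() or expression[j] == "_"):
--                 j += 1
--             tokens.append((True, expression[i:j]))
--             i = j
--         else:
--             tokens.append((False, ch))
--             i += 1
--     return tokens
--
--
-- def _rename_cel_identifier(expression: str, old_name: str, new_name: str) -> str:
--     """Rename a CEL identifier without touching quoted string literals."""
--     return "".join(
--         new_name if is_ident and text == old_name else text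
--         for is_ident, text in _tokenize(expression)
--     )
-- ===== Notes on version B (the rewrite author's own statement) =====
-- stated objective: alternative
-- what changed: A is a single char-by-char loop carrying quote state across iterations and appending characters one at a time; B is a two-pass tokenizer that consumes each quoted literal and each identifier as one whole tagged token and then joins the tokens, replacing identifier tokens equal to old_name.
import Mathlib
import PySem

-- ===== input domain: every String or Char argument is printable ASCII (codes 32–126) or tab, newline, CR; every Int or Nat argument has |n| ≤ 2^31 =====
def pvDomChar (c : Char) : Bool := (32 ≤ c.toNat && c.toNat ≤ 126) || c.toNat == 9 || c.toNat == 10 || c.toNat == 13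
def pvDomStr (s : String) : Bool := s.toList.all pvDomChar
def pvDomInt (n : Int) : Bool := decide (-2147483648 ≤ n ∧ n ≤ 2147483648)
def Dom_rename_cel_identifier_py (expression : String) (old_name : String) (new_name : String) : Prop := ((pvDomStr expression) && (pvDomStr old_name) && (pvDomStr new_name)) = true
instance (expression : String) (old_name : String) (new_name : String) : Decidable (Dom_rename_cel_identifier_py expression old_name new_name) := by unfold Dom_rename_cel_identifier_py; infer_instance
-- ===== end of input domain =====

-- B replaces A's char-by-char loop with cross-iteration quote state by a two-pass
-- tokenizer (whole string-literal / identifier chunks, tagged, then a join with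
-- replacement); objective: alternative structure, same asymptotic cost.


-- ===== PORT A =====
-- A's while-loop: structural recursion over the remaining characters, carrying the
-- loop state (quote : Option Char; prev = expression[i-1], none at i = 0).
def pvIdentCont (d : Char) : Bool := PySem.Chars.isalnum d || d == '_'

def pvAGo (old_name new_name : List Char) (quote : Option Char) (prev : Option Char) :
    List Char → List Char
  | [] => []
  | c :: rest =>
    match quote with
    | some q =>
      -- result.append(ch); close the string iff ch == quote and (i == 0 or prev != '\\')
      c :: pvAGo old_name new_name
            (if c == q && (match prev with | none => true | some p => p != '\\') then none
             else some q) (some c) rest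
    | none =>
      if c == '\'' || c == '"' then
        c :: pvAGo old_name new_name (some c) (some c) rest
      else if PySem.Chars.isalpha c || c == '_' then
        -- scan j forward over isalnum/_ ; token = expression[i:j]
        let span := rest.takeWhile pvIdentCont
        let token := c :: span
        (if token == old_name then new_name else token) ++
          pvAGo old_name new_name none (some (span.getLastD c)) (rest.dropWhile pvIdentCont)
      else
        c :: pvAGo old_name new_name none (some c) rest
  termination_by cs => cs.length
  decreasing_by
  all_goals simp [List.length_dropWhile_le]

def rename_cel_identifier_py (expression : String) (old_name : String) (new_name : String) : String :=
  String.ofList (pvAGo old_name.toList new_name.toList none none expression.toList)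

-- ===== PORT B =====
-- the inner while-loop of _tokenize's string-literal branch: returns (body incl.
-- closing quote when present, rest)
def pvScanStr (q : Char) (prev : Char) : List Char → List Char × List Char
  | [] => ([], [])
  | c :: rest =>
    if c == q && prev != '\\' then ([c], rest)
    else
      let s := pvScanStr q c rest
      (c :: s.1, s.2)

-- needed by pvTok's decreasing_by (cited by name there)
theorem pvScanStr_snd_length_le (q : Char) :
    ∀ (cs : List Char) (prev : Char), (pvScanStr q prev cs).2.length ≤ cs.length := by
  intro cs
  induction cs with
  | nil => intro _; simp [pvScanStr]
  | cons c rest ih =>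
    intro prev
    simp only [pvScanStr]
    split
    · simp
    · simpa using Nat.le_succ_of_le (ih c)

-- _tokenize: the token list, (is_ident, text)
def pvTok : List Char → List (Bool × List Char)
  | [] => []
  | c :: rest =>
    if c == '\'' || c == '"' then
      let s := pvScanStr c c rest
      (false, c :: s.1) :: pvTok s.2
    else if PySem.Chars.isalpha c || c == '_' then
      (true, c :: rest.takeWhile pvIdentCont) :: pvTok (rest.dropWhile pvIdentCont)
    else
      (false, [c]) :: pvTok rest
  termination_by cs => cs.length
  decreasing_by
  · simpa [Nat.lt_succ_iff] using pvScanStr_snd_length_le c rest c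
  · simpa [Nat.lt_succ_iff] using List.length_dropWhile_le pvIdentCont rest
  · simp

def rename_cel_identifier_py_alt (expression : String) (old_name : String) (new_name : String) : String :=
  String.ofList ((pvTok expression.toList).flatMap
    (fun t => if t.1 && t.2 == old_name.toList then new_name.toList else t.2))

-- ===== PRECONDITION & SPEC =====
def Spec_rename_cel_identifier_py (expression : String) (old_name : String) (new_name : String) (out : String) : Prop := out = rename_cel_identifier_py_alt expression old_name new_name
instance (expression : String) (old_name : String) (new_name : String) (out : String) : Decidable (Spec_rename_cel_identifier_py expression old_name new_name out) := by unfold Spec_rename_cel_identifier_py; infer_instance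

-- ===== CLAIM (what is proved, stated in full; the proofs are below) =====
def Claim_equal_rename_cel_identifier_py : Prop := ∀ (expression : String) (old_name : String) (new_name : String), Dom_rename_cel_identifier_py expression old_name new_name → Spec_rename_cel_identifier_py expression old_name new_name (rename_cel_identifier_py expression old_name new_name)

-- ===== LEMMAS AND PROOFS =====

-- in mode quote = none, the prev state is never read
theorem pvAGo_none_prev (old_name new_name : List Char) (cs : List Char)
    (p p' : Option Char) :
    pvAGo old_name new_name none p cs = pvAGo old_name new_name none p' cs := by
  cases cs with
  | nil => simp [pvAGo]
  | cons c rest => simp only [pvAGo]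

-- A's quote mode equals B's string scanner followed by top-level mode
theorem pvAGo_quote_eq_scan (old_name new_name : List Char) :
    ∀ (cs : List Char) (q p : Char) (p0 : Option Char),
      pvAGo old_name new_name (some q) (some p) cs =
        (pvScanStr q p cs).1 ++ pvAGo old_name new_name none p0 (pvScanStr q p cs).2 := by
  intro cs
  induction cs with
  | nil => intro q p p0; simp [pvAGo, pvScanStr]
  | cons c rest ih =>
    intro q p p0
    simp only [pvAGo, pvScanStr]
    by_cases h : (c == q && p != '\\') = true
    · rw [if_pos h, if_pos h]
      exact congrArg (c :: ·) (pvAGo_none_prev _ _ _ _ _)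
    · rw [if_neg h, if_neg h]
      simpa using congrArg (c :: ·) (ih q c p0)

-- main induction: A's top-level mode equals B's tokenize-then-join
theorem pvAGo_eq_tok (old_name new_name : List Char) :
    ∀ (n : Nat) (cs : List Char), cs.length ≤ n → ∀ (p0 : Option Char),
      pvAGo old_name new_name none p0 cs =
        (pvTok cs).flatMap
          (fun t => if t.1 && t.2 == old_name then new_name else t.2) := by
  intro n
  induction n with
  | zero =>
    intro cs h p0
    have : cs = [] := List.length_eq_zero_iff.mp (Nat.le_zero.mp h)
    subst this; simp [pvAGo, pvTok]
  | succ n ih =>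
    intro cs h p0
    cases cs with
    | nil => simp [pvAGo, pvTok]
    | cons c rest =>
      have hr : rest.length ≤ n := by simpa [Nat.succ_le_succ_iff] using h
      simp only [pvAGo, pvTok]
      by_cases hq : (c == '\'' || c == '"') = true
      · simp only [hq, if_true]
        rw [pvAGo_quote_eq_scan old_name new_name rest c c p0]
        rw [ih (pvScanStr c c rest).2 (le_trans (pvScanStr_snd_length_le c rest c) hr) p0]
        simp [List.flatMap_cons]
      · simp only [hq]
        by_cases ha : (PySem.Chars.isalpha c || c == '_') = true
        · simp only [ha, if_true]
          rw [ih (rest.dropWhile pvIdentCont)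
                (le_trans (List.length_dropWhile_le pvIdentCont rest) hr)]
          simp [List.flatMap_cons]
        · simp only [ha]
          rw [ih rest hr]
          simp [List.flatMap_cons]

-- ===== VERDICT (by name: the statement is the Claim_ definition above) =====
theorem rename_cel_identifier_py_spec : Claim_equal_rename_cel_identifier_py := by
  intro expression old_name new_name _
  unfold Spec_rename_cel_identifier_py rename_cel_identifier_py rename_cel_identifier_py_alt
  exact congrArg String.ofList
    (pvAGo_eq_tok old_name.toList new_name.toList expression.toList.length
      expression.toList (le_refl _) none)
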